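-- pv_equiv track=rewrite | github.com/nguyennth/joint-ib-models | src/loader/prepData/sentence.py | calculate_offset
-- ===== SOURCE A (Python) =====
-- def calculate_offset(sentences, i):
--     """
--     Get the offset for each word in
--     the ith sentence.
--     """
--     offsets = []
--     sentence = sentences[i]
--     words = sentence.split(' ')
--     if i == 0:
--         start_pos = 0
--     else:
--         start_pos = len('\n'.join(sentences[0:i])) + 1
--
--     for j, word in enumerate(words):
--         if j == 0:
--             start = start_pos
--         else:
--             start = start_pos + len(' '.join(words[0:j])) + 1
--
--         offsets.append([start, start + len(word)])
--
--     return offsets, words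
-- ===== SOURCE B (Python) =====
-- def calculate_offset(sentences, i):
--     """
--     Get the offset for each word in
--     the ith sentence.
--     """
--     sentence = sentences[i]
--     words = sentence.split(' ')
--     if i == 0:
--         start_pos = 0
--     else:
--         start_pos = len('\n'.join(sentences[0:i])) + 1
--     # cumulative-offset table: prefix[j] = sum(len(w) + 1 for w in words[:j])
--     prefix = [0]
--     for w in words:
--         prefix.append(prefix[-1] + len(w) + 1)
--     offsets = [[start_pos + p, start_pos + p + len(w)]
--                for p, w in zip(prefix, words)]
--     return offsets, words
-- ===== Notes on version B (the rewrite author's own statement) =====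
-- stated objective: alternative
-- what changed: B replaces A's per-word re-join of words[0:j] by a cumulative-offset table built in one pass (prefix[j] = sum of len(w)+1 over the first j words) and then emits all offset pairs in a single map over zip(prefix, words).
import Mathlib
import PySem

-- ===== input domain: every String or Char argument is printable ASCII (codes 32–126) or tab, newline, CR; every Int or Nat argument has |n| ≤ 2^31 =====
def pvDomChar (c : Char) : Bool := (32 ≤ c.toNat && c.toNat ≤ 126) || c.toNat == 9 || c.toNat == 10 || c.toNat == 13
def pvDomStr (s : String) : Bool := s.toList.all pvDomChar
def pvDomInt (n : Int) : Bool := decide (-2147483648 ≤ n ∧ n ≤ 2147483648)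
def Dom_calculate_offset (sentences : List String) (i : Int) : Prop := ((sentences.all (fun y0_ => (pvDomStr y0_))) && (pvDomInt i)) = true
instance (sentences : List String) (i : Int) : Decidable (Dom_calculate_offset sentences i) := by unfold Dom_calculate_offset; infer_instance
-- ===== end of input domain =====

-- B replaces A's per-word re-join of words[0:j] by a one-pass cumulative-offset table,
-- then emits all offset pairs in a single map over zip(prefix, words).

-- ===== PORT A =====
def calculate_offset (sentences : List String) (i : Int) : List (List Int) × List String :=
  let sentence := PySem.List.pyGetD sentences i ""
  let words := (PySem.Str.split? sentence " ").getD []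
  let start_pos : Int :=
    if i = 0 then 0
    else PySem.Str.len (PySem.Str.join "\n" (PySem.List.slice sentences (some 0) (some i))) + 1
  let offsets := (PySem.List.enumerate words).foldl (fun acc jw =>
    let start : Int :=
      if jw.1 = 0 then start_pos
      else start_pos + PySem.Str.len (PySem.Str.join " " (PySem.List.slice words (some 0) (some jw.1))) + 1
    acc ++ [[start, start + PySem.Str.len jw.2]]) []
  (offsets, words)

-- ===== PORT B =====
def calculate_offset_alt (sentences : List String) (i : Int) : List (List Int) × List String :=
  let sentence := PySem.List.pyGetD sentences i ""
  let words := (PySem.Str.split? sentence " ").getD []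
  let start_pos : Int :=
    if i = 0 then 0
    else PySem.Str.len (PySem.Str.join "\n" (PySem.List.slice sentences (some 0) (some i))) + 1
  let pfx := words.foldl (fun ps w => ps ++ [PySem.List.pyGetD ps (-1) 0 + PySem.Str.len w + 1]) [(0 : Int)]
  let offsets := (pfx.zip words).map (fun pw => [start_pos + pw.1, start_pos + pw.1 + PySem.Str.len pw.2])
  (offsets, words)

-- ===== PRECONDITION & SPEC =====
-- Pre_: A raises IndexError when i is out of range of sentences (B does too).
def Pre_calculate_offset (sentences : List String) (i : Int) : Prop :=
  PySem.Raise.InRange sentences.length i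
instance (sentences : List String) (i : Int) : Decidable (Pre_calculate_offset sentences i) := by
  unfold Pre_calculate_offset; infer_instance
def pvWitness_calculate_offset : List String × Int := (["ab c de", "f gh"], 1)

def Spec_calculate_offset (sentences : List String) (i : Int) (out : List (List Int) × List String) : Prop := out = calculate_offset_alt sentences i
instance (sentences : List String) (i : Int) (out : List (List Int) × List String) : Decidable (Spec_calculate_offset sentences i out) := by unfold Spec_calculate_offset; infer_instance

-- ===== CLAIM (what is proved, stated in full; the proofs are below) =====
def Claim_equal_calculate_offset : Prop := ∀ (sentences : List String) (i : Int), Dom_calculate_offset sentences i → Pre_calculate_offset sentences i → Spec_calculate_offset sentences i (calculate_offset sentences i)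

-- ===== LEMMAS AND PROOFS =====

-- per-word weight: len(w) + 1
def pvW (w : String) : Int := PySem.Str.len w + 1

-- length of ' '.join over a nonempty list of char lists
theorem pv_len_join_chars (c : List Char) (cs : List (List Char)) :
    (PySem.Chars.join [' '] (c :: cs)).length = c.length + (cs.map (fun d => d.length + 1)).sum := by
  induction cs generalizing c with
  | nil => simp [PySem.Chars.join_singleton]
  | cons d ds ih =>
    rw [PySem.Chars.join_cons_cons]
    simp only [List.length_append, ih d, List.map_cons, List.sum_cons, List.length_cons,
      List.length_nil]
    omega

-- Str-level corollary, in Int form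
theorem pv_sum_pvW (ws : List String) :
    (ws.map pvW).sum = (((ws.map (fun s => s.toList.length + 1)).sum : Nat) : Int) := by
  induction ws with
  | nil => simp
  | cons w ws ih =>
    simp only [List.map_cons, List.sum_cons, ih, pvW, PySem.Str.len_eq]
    push_cast
    ring

theorem pv_len_join_sp (ws : List String) (h : ws ≠ []) :
    PySem.Str.len (PySem.Str.join " " ws) + 1 = (ws.map pvW).sum := by
  cases ws with
  | nil => exact absurd rfl h
  | cons w ws =>
    have hsp : (" " : String).toList = [' '] := rfl
    simp only [PySem.Str.len_eq, PySem.Str.toList_join, hsp, List.map_cons, List.sum_cons,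
      pv_len_join_chars w.toList (ws.map String.toList)]
    rw [pv_sum_pvW]
    have hmm : (List.map (fun d : List Char => d.length + 1) (List.map String.toList ws)).sum
        = (List.map (fun s : String => s.toList.length + 1) ws).sum := by
      simp [List.map_map, Function.comp_def]
    rw [hmm]
    simp only [pvW, PySem.Str.len_eq]
    push_cast
    ring

-- the prefix-table fold, characterised
theorem pv_prefix_fold (ws : List String) (acc : List Int) (a : Int) :
    ws.foldl (fun ps w => ps ++ [PySem.List.pyGetD ps (-1) 0 + PySem.Str.len w + 1]) (acc ++ [a])
      = acc ++ (List.range (ws.length + 1)).map (fun k => a + ((ws.take k).map pvW).sum) := by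
  induction ws generalizing acc a with
  | nil => simp
  | cons w ws ih =>
    simp only [List.foldl_cons, PySem.List.pyGetD_neg_one_append_singleton]
    rw [ih (acc ++ [a]) (a + PySem.Str.len w + 1)]
    rw [List.append_assoc]
    congr 1
    conv_rhs => rw [show (w :: ws).length + 1 = (ws.length + 1) + 1 from by simp,
      List.range_succ_eq_map, List.map_cons, List.map_map,
      List.range_succ_eq_map, List.map_cons, List.map_map]
    rw [List.singleton_append]
    congr 1
    · simp
    conv_lhs => rw [List.range_succ_eq_map, List.map_cons, List.map_map]
    congr 1
    · simp [pvW, PySem.Str.len_eq]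
      omega
    apply List.map_congr_left
    intro k _
    simp only [Function.comp_apply, List.take_succ_cons, List.map_cons, List.sum_cons, pvW,
      PySem.Str.len_eq]
    ring

theorem pv_sum_take_succ (ws : List String) (k : Nat) (hk : ws ≠ []) :
    ((ws.take (k + 1)).map pvW).sum = PySem.Str.len (PySem.Str.join " " (ws.take (k + 1))) + 1 := by
  have hne : ws.take (k + 1) ≠ [] := by
    cases ws with
    | nil => exact absurd rfl hk
    | cons w ws => simp [List.take_succ_cons]
  exact (pv_len_join_sp _ hne).symm

-- ===== VERDICT (by name: the statement is the Claim_ definition above) =====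
theorem calculate_offset_spec : Claim_equal_calculate_offset := by
  intro sentences i _ _
  unfold Spec_calculate_offset calculate_offset calculate_offset_alt
  simp only []
  set words := (PySem.Str.split? (PySem.List.pyGetD sentences i "") " ").getD [] with hw
  set sp : Int :=
    (if i = 0 then 0
     else PySem.Str.len (PySem.Str.join "\n" (PySem.List.slice sentences (some 0) (some i))) + 1) with hsp
  -- rewrite B's pfx
  have hpfx := pv_prefix_fold words [] 0
  simp only [List.nil_append] at hpfx
  rw [hpfx]
  -- rewrite A's fold as a map
  rw [PySem.List.foldl_append_singleton_eq_map
    (fun jw : Int × String =>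
      [(if jw.1 = 0 then sp
        else sp + PySem.Str.len (PySem.Str.join " " (PySem.List.slice words (some 0) (some jw.1))) + 1),
       (if jw.1 = 0 then sp
        else sp + PySem.Str.len (PySem.Str.join " " (PySem.List.slice words (some 0) (some jw.1))) + 1)
        + PySem.Str.len jw.2])]
  simp only [List.nil_append]
  refine Prod.ext ?_ rfl
  apply List.ext_getElem
  · simp [PySem.List.length_enumerate]
  · intro j h1 h2
    simp only [List.getElem_map, List.getElem_zip, PySem.List.getElem_enumerate]
    have hj : j < words.length := by
      simpa [PySem.List.length_enumerate] using h1
    simp only [List.getElem_range]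
    have hkey : ∀ (jn : Nat), jn < words.length →
        (if ((0 : Int) + (jn : Int)) = 0 then sp
         else sp + PySem.Str.len (PySem.Str.join " "
           (PySem.List.slice words (some 0) (some ((0 : Int) + (jn : Int))))) + 1)
        = sp + (0 + ((words.take jn).map pvW).sum) := by
      intro jn hjn
      cases jn with
      | zero => simp
      | succ k =>
        have hne : (0 : Int) + (((k + 1 : Nat) : Nat) : Int) ≠ 0 := by push_cast; omega
        rw [if_neg hne]
        have hslice : PySem.List.slice words (some 0) (some ((0 : Int) + (((k + 1 : Nat) : Nat) : Int)))
            = words.take (k + 1) := by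
          rw [show (0 : Int) + (((k + 1 : Nat) : Nat) : Int) = (((k + 1 : Nat) : Nat) : Int) from by ring,
            PySem.List.slice_zero_start, PySem.List.slice_to_natCast]
        rw [hslice]
        have hwne : words ≠ [] := by
          intro h0; rw [h0] at hjn; simp at hjn
        rw [pv_sum_take_succ words k hwne]
        ring
    rw [hkey j hj]
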